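-- pv_equiv track=rewrite | github.com/lu-ci/apex-sigma-core | sigma/core/utilities/dialogue_controls.py | get_desc
-- ===== SOURCE A (Python) =====
-- def get_desc(desc):
--     """
--     Parses text so that only the first character
--     of the string is capitalized.
--     :param desc:
--     :type desc: str
--     :type desc: str
--     :rtype: str
--     """
--     pieces = desc.split(' ')
--     if len(pieces) > 1:
--         first = pieces[0].title()
--         other = [piece.lower() for piece in pieces[1:]]
--         desc = ' '.join([first] + other)
--     else:
--         desc = desc.title()
--     return desc
-- ===== SOURCE B (Python) =====
-- def get_desc(desc):
--     head, sep, rest = desc.partition(' ')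
--     return head.title() + sep + rest.lower()
-- ===== Notes on version B (the rewrite author's own statement) =====
-- stated objective: simpler
-- what changed: Replaces split-on-space, an explicit length check branch, a lowercasing list comprehension and a join with a single str.partition at the first space and one concatenation of the titled head, the separator and the lowercased remainder.
import Mathlib
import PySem

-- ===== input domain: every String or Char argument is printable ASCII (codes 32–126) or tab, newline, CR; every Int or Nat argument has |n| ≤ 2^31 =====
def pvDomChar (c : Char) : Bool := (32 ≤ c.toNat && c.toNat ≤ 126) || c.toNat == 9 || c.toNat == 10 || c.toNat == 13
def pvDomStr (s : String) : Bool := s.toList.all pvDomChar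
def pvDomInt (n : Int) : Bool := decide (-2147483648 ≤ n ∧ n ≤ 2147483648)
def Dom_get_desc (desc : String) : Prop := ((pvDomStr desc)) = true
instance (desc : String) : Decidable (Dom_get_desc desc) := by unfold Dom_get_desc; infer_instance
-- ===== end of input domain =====

-- B replaces A's split-on-space / branch / lowercase-comprehension / join with a single
-- str.partition(' ') and one concatenation (objective: simpler).

-- Python's str.title(), hand-ported (exact on the ASCII domain, where 'cased' = alpha):
-- a cased char is uppercased after a non-cased char and lowercased otherwise.
-- Shared helper: both Pythons call the builtin str.title().
def titleChars (prev : Bool) : List Char → List Char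
  | [] => []
  | c :: rest =>
    if PySem.Chars.isalpha c then
      (if prev then PySem.Chars.lowerChar c else PySem.Chars.upperChar c) :: titleChars true rest
    else
      c :: titleChars false rest

def strTitle (s : String) : String := String.ofList (titleChars false s.toList)

-- ===== PORT A =====
def get_desc (desc : String) : String :=
  let pieces := (PySem.Str.split? desc " ").getD []   -- sep " " is nonempty, so split? is always some
  if pieces.length > 1 then
    let first := strTitle ((PySem.List.pyGet? pieces 0).getD "")   -- pieces is never empty: pyGet? is some
    let other := (PySem.List.slice pieces (some 1) none).map PySem.Str.lower
    PySem.Str.join " " (first :: other)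
  else
    strTitle desc

-- ===== PORT B =====
-- head, sep, rest = desc.partition(' ')  — ported as span: takeWhile/dropWhile at the first ' '
def get_desc_alt (desc : String) : String :=
  let cs := desc.toList
  let head := cs.takeWhile (fun c => c ≠ ' ')
  let tl := cs.dropWhile (fun c => c ≠ ' ')
  let sep : List Char := if tl.isEmpty then [] else [' ']
  let rest : List Char := if tl.isEmpty then [] else tl.tail
  String.ofList (titleChars false head ++ sep ++ PySem.Chars.lower rest)

-- ===== PRECONDITION & SPEC =====
def Spec_get_desc (desc : String) (out : String) : Prop := out = get_desc_alt desc
instance (desc : String) (out : String) : Decidable (Spec_get_desc desc out) := by unfold Spec_get_desc; infer_instance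

-- ===== CLAIM (what is proved, stated in full; the proofs are below) =====
def Claim_equal_get_desc : Prop := ∀ (desc : String), Dom_get_desc desc → Spec_get_desc desc (get_desc desc)

-- ===== LEMMAS AND PROOFS =====

-- Simple specification of str.split(' '): first space-free chunk, recurse after the first ' '.
def splitSp (cs : List Char) : List (List Char) :=
  match h : cs.dropWhile (fun c => c ≠ ' ') with
  | [] => [cs]
  | _ :: r => cs.takeWhile (fun c => c ≠ ' ') :: splitSp r
termination_by cs.length
decreasing_by
  have h1 : (cs.dropWhile (fun c => c ≠ ' ')).length ≤ cs.length := (List.dropWhile_sublist _).length_le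
  rw [h] at h1; simp at h1; omega

theorem splitSp_nil {cs : List Char} (h : cs.dropWhile (fun c => c ≠ ' ') = []) :
    splitSp cs = [cs] := by
  conv_lhs => rw [splitSp]
  split
  · rfl
  · rename_i d r heq; rw [h] at heq; cases heq

theorem splitSp_cons {cs : List Char} {d : Char} {r : List Char}
    (h : cs.dropWhile (fun c => c ≠ ' ') = d :: r) :
    splitSp cs = cs.takeWhile (fun c => c ≠ ' ') :: splitSp r := by
  conv_lhs => rw [splitSp]
  split
  · rename_i heq; rw [h] at heq; cases heq
  · rename_i e r' heq; rw [h] at heq; injection heq with h1 h2; rw [h2]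

theorem splitSp_ne_nil (cs : List Char) : splitSp cs ≠ [] := by
  unfold splitSp; split <;> simp

def mergeF (p : List Char) : List (List Char) → List (List Char)
  | [] => [p]
  | x :: xs => (p ++ x) :: xs

theorem dropWhile_eq_cons_head {α : Type} (p : α → Bool) (l : List α) (c : α) (r : List α)
    (h : l.dropWhile p = c :: r) : p c = false := by
  induction l with
  | nil => simp at h
  | cons a l ih =>
    by_cases hp : p a
    · rw [List.dropWhile_cons_of_pos hp] at h; exact ih h
    · rw [List.dropWhile_cons_of_neg hp] at h
      cases h; simpa using hp

theorem splitOn_go_eq : ∀ (fuel : Nat) (l cur : List Char) (acc : List (List Char)),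
    l.length ≤ fuel →
    PySem.Chars.splitOn.go [' '] fuel l cur acc = acc.reverse ++ mergeF cur.reverse (splitSp l) := by
  intro fuel
  induction fuel with
  | zero =>
    intro l cur acc hl
    have : l = [] := List.eq_nil_of_length_eq_zero (Nat.le_zero.mp hl)
    subst this
    rw [splitSp_nil (by simp)]
    simp [PySem.Chars.splitOn.go, mergeF]
  | succ n ih =>
    intro l cur acc hl
    cases l with
    | nil =>
      rw [splitSp_nil (by simp)]
      simp [PySem.Chars.splitOn.go, mergeF]
    | cons c rest =>
      by_cases hc : c = ' '
      · subst hc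
        have hpre : [' '].isPrefixOf (' ' :: rest) = true := by simp [List.isPrefixOf]
        rw [PySem.Chars.splitOn.go, if_pos hpre]
        simp only [List.length_singleton, List.drop_succ_cons, List.drop_zero]
        rw [ih rest [] (cur.reverse :: acc) (by simp at hl; omega)]
        rw [splitSp_cons (cs := ' ' :: rest) (d := ' ') (r := rest) (by rw [List.dropWhile_cons_of_neg (by simp)])]
        rw [List.takeWhile_cons_of_neg (by simp)]
        obtain ⟨x, xs, hx⟩ := List.exists_cons_of_ne_nil (splitSp_ne_nil rest)
        simp [hx, mergeF]
      · have hpre : [' '].isPrefixOf (c :: rest) = false := by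
          simp [List.isPrefixOf]; exact fun h => hc h.symm
        rw [PySem.Chars.splitOn.go, if_neg (by simp [hpre])]
        rw [ih rest (c :: cur) acc (by simp at hl; omega)]
        rcases hdw : rest.dropWhile (fun c => c ≠ ' ') with _ | ⟨d, r⟩
        · rw [splitSp_nil hdw,
            splitSp_nil (cs := c :: rest) (by rw [List.dropWhile_cons_of_pos (by simp [hc])]; exact hdw)]
          simp [mergeF]
        · rw [splitSp_cons hdw,
            splitSp_cons (cs := c :: rest) (d := d) (r := r)
              (by rw [List.dropWhile_cons_of_pos (by simp [hc])]; exact hdw)]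
          rw [List.takeWhile_cons_of_pos (by simp [hc])]
          simp [mergeF]

theorem splitOn_eq_splitSp (cs : List Char) : PySem.Chars.splitOn cs [' '] = splitSp cs := by
  unfold PySem.Chars.splitOn
  rw [splitOn_go_eq (cs.length + 1) cs [] [] (Nat.le_succ _)]
  obtain ⟨x, xs, hx⟩ := List.exists_cons_of_ne_nil (splitSp_ne_nil cs)
  simp [hx, mergeF]

theorem join_lower_splitSp (r : List Char) :
    PySem.Chars.join [' '] ((splitSp r).map PySem.Chars.lower) = PySem.Chars.lower r := by
  induction r using splitSp.induct with
  | case1 cs h =>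
    rw [splitSp_nil h]
    simp [PySem.Chars.join_singleton]
  | case2 cs d r h ih =>
    have hd : d = ' ' := by
      have := dropWhile_eq_cons_head _ cs d r h
      simpa using this
    subst hd
    obtain ⟨x, xs, hx⟩ := List.exists_cons_of_ne_nil (splitSp_ne_nil r)
    rw [splitSp_cons h, List.map_cons, hx, List.map_cons, PySem.Chars.join_cons_cons,
      ← List.map_cons, ← hx, ih]
    have hcs : cs.takeWhile (fun c => c ≠ ' ') ++ ' ' :: r = cs := by
      conv_rhs => rw [← List.takeWhile_append_dropWhile (p := fun c => c ≠ ' ') (l := cs)]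
      rw [h]
    conv_rhs => rw [← hcs]
    simp [PySem.Chars.lower, show PySem.Chars.lowerChar ' ' = ' ' from by decide]

-- ===== VERDICT (by name: the statement is the Claim_ definition above) =====
theorem get_desc_spec : Claim_equal_get_desc := by
  intro desc _
  show get_desc desc = get_desc_alt desc
  simp only [get_desc, get_desc_alt]
  have hsplit : PySem.Str.split? desc " " = some ((splitSp desc.toList).map String.ofList) := by
    simp [PySem.Str.split?, PySem.Chars.split?, splitOn_eq_splitSp]
  rw [hsplit]
  rcases hdw : desc.toList.dropWhile (fun c => c ≠ ' ') with _ | ⟨d, r⟩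
  · -- no ' ' in desc: one piece on both sides
    rw [splitSp_nil hdw]
    have htk : desc.toList.takeWhile (fun c => c ≠ ' ') = desc.toList := by
      conv_rhs => rw [← List.takeWhile_append_dropWhile (p := fun c => c ≠ ' ') (l := desc.toList)]
      rw [hdw]; simp
    rw [htk]
    simp [strTitle, PySem.Chars.lower]
  · have hd : d = ' ' := by
      have := dropWhile_eq_cons_head _ desc.toList d r hdw
      simpa using this
    subst hd
    rw [splitSp_cons hdw]
    obtain ⟨x, xs, hx⟩ := List.exists_cons_of_ne_nil (splitSp_ne_nil r)
    have hlen : (((desc.toList.takeWhile (fun c => c ≠ ' ') :: splitSp r).map String.ofList)).length > 1 := by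
      simp [hx]
    simp only [List.map_cons, Option.getD_some]
    rw [if_pos (by simpa using hlen)]
    have hget : PySem.List.pyGet?
        (String.ofList (desc.toList.takeWhile (fun c => c ≠ ' ')) :: (splitSp r).map String.ofList) 0
        = some (String.ofList (desc.toList.takeWhile (fun c => c ≠ ' '))) := by
      simp [PySem.List.pyGet?, PySem.List.pyIdx?]
    rw [hget]
    rw [PySem.List.slice_from _ (by norm_num)]
    simp only [Int.toNat_one, List.drop_succ_cons, List.drop_zero, Option.getD_some]
    -- reduce the join on the A side to chars
    have hjoin : PySem.Str.join " " (strTitle (String.ofList (desc.toList.takeWhile (fun c => c ≠ ' ')))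
          :: ((splitSp r).map String.ofList).map PySem.Str.lower)
        = String.ofList (titleChars false (desc.toList.takeWhile (fun c => c ≠ ' '))
            ++ [' '] ++ PySem.Chars.lower r) := by
      unfold PySem.Str.join
      congr 1
      rw [List.map_cons]
      have hmaps : (((splitSp r).map String.ofList).map PySem.Str.lower).map String.toList
          = (splitSp r).map PySem.Chars.lower := by
        simp [Function.comp_def]
      rw [hmaps]
      have : (strTitle (String.ofList (desc.toList.takeWhile (fun c => c ≠ ' ')))).toList
          = titleChars false (desc.toList.takeWhile (fun c => c ≠ ' ')) := by
        simp [strTitle]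
      rw [this]
      rw [show (" " : String).toList = [' '] from by decide]
      obtain ⟨y, ys, hy⟩ := List.exists_cons_of_ne_nil (splitSp_ne_nil r)
      rw [hy, List.map_cons, PySem.Chars.join_cons_cons, ← List.map_cons, ← hy, join_lower_splitSp]
    rw [hjoin]
    -- B side
    simp
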